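-- pv_equiv track=rewrite | github.com/donghyeon95/- | 10주차/김지원_풀이/사냥꾼.py | dp
-- ===== SOURCE A (Python) =====
-- def dp(dp_t):
--     if len(dp_t) == 0:
--         return 0
--     if len(dp_t) == 1:
--         return 1
--     for i in range(len(dp_t)-1,-1,-1):
--         if (dp_t[i] + 1) != dp_t[i-1]:
--             return 1 + dp(dp_t[:i])
-- ===== SOURCE B (Python) =====
-- def dp(dp_t):
--     if not dp_t:
--         return 0
--     return 1 + sum(1 for prev, cur in zip(dp_t, dp_t[1:]) if cur + 1 != prev)
-- ===== Notes on version B (the rewrite author's own statement) =====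
-- stated objective: faster
-- what changed: Replaced the recursive slice-and-rescan (find the last break, recurse on the prefix) by a single linear pass over adjacent pairs that counts break positions directly.
import Mathlib
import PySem

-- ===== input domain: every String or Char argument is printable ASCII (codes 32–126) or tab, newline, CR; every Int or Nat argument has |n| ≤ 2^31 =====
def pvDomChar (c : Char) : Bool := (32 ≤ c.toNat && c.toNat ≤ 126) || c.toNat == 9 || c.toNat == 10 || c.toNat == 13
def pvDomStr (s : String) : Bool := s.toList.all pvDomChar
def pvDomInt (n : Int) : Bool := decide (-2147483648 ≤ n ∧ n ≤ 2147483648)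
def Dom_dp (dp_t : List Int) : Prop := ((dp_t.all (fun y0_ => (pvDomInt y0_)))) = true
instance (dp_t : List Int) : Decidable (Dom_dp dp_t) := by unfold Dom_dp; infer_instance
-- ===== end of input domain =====

-- B replaces A's recursive last-break-then-slice scan by one linear pass counting break positions.

-- ===== PORT A =====
-- A's for-loop: scan i = k, k-1, …, 0 and return the first i with dp_t[i] + 1 != dp_t[i-1]
-- (at i = 0 Python's dp_t[i-1] is the NEGATIVE index -1, the last element); none = loop falls through.
def dpFind (l : List Int) : Nat → Option Nat
  | 0 => if (PySem.List.pyGet? l 0).getD 0 + 1 ≠ (PySem.List.pyGet? l (-1)).getD 0 then some 0 else none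
  | (i+1) => if (PySem.List.pyGet? l ((i+1 : Nat) : Int)).getD 0 + 1 ≠ (PySem.List.pyGet? l ((i : Nat) : Int)).getD 0
             then some (i+1) else dpFind l i

theorem dpFind_le (l : List Int) : ∀ k i, dpFind l k = some i → i ≤ k := by
  intro k
  induction k with
  | zero => intro i h; unfold dpFind at h; split at h <;> simp_all
  | succ n ih =>
      intro i h; unfold dpFind at h; split at h
      · simp_all
      · exact Nat.le_succ_of_le (ih i h)

def dp (dp_t : List Int) : Int :=
  if dp_t.length = 0 then 0
  else if dp_t.length = 1 then 1
  else match h : dpFind dp_t (dp_t.length - 1) with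
    | some i => 1 + dp (PySem.List.slice dp_t none (some (i : Int)))   -- dp_t[:i]
    | none => 0   -- Python's loop would fall through and return None; this branch is unreachable (dpFind_ne_none below)
termination_by dp_t.length
decreasing_by
  have hi := dpFind_le dp_t (dp_t.length - 1) i h
  simp [PySem.List.slice_to_natCast]
  omega

-- ===== PORT B =====
def dp_alt (dp_t : List Int) : Int :=
  if dp_t = [] then 0
  else 1 + (((dp_t.zip (PySem.List.slice dp_t (some 1) none)).countP
              (fun pc => decide (pc.2 + 1 ≠ pc.1)) : Nat) : Int)

-- ===== PRECONDITION & SPEC =====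
def Spec_dp (dp_t : List Int) (out : Int) : Prop := out = dp_alt dp_t
instance (dp_t : List Int) (out : Int) : Decidable (Spec_dp dp_t out) := by unfold Spec_dp; infer_instance

-- ===== CLAIM (what is proved, stated in full; the proofs are below) =====
def Claim_equal_dp : Prop := ∀ (dp_t : List Int), Dom_dp dp_t → Spec_dp dp_t (dp dp_t)

-- ===== LEMMAS AND PROOFS =====

-- break count by pair index: j is a break iff l[j+1] + 1 ≠ l[j]
def bc (l : List Int) : Nat :=
  (List.range (l.length - 1)).countP (fun j => decide (l.getD (j+1) 0 + 1 ≠ l.getD j 0))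

theorem zip_tail_countP (l : List Int) :
    (l.zip l.tail).countP (fun pc => decide (pc.2 + 1 ≠ pc.1)) = bc l := by
  induction l with
  | nil => simp [bc]
  | cons a t ih =>
      cases t with
      | nil => simp [bc]
      | cons b t' =>
          have hzip : ((a :: b :: t').zip (a :: b :: t').tail)
              = (a, b) :: ((b :: t').zip (b :: t').tail) := by simp [List.zip]
          have hlen : (a :: b :: t').length - 1 = ((b :: t').length - 1) + 1 := by simp
          rw [hzip, List.countP_cons, ih]
          unfold bc
          rw [hlen, List.range_succ_eq_map, List.countP_cons, List.countP_map]
          have hmap : (List.range ((b :: t').length - 1)).countP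
                ((fun j => decide ((a :: b :: t').getD (j+1) 0 + 1 ≠ (a :: b :: t').getD j 0)) ∘ Nat.succ)
              = (List.range ((b :: t').length - 1)).countP
                (fun j => decide ((b :: t').getD (j+1) 0 + 1 ≠ (b :: t').getD j 0)) := by
            apply List.countP_congr
            intro j _
            simp [Function.comp]
          rw [hmap]
          simp [List.getD]

theorem dp_alt_eq_bc (l : List Int) (h : l ≠ []) : dp_alt l = 1 + (bc l : Int) := by
  unfold dp_alt
  rw [if_neg h, PySem.List.slice_from_one, zip_tail_countP]

theorem getD_take (l : List Int) (i j : Nat) (h : j < i) :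
    (l.take i).getD j 0 = l.getD j 0 := by
  simp [List.getD, List.getElem?_take, h]

theorem bc_take (l : List Int) (i : Nat) (hi : i ≤ l.length) :
    bc (l.take i) = (List.range (i - 1)).countP
       (fun j => decide (l.getD (j+1) 0 + 1 ≠ l.getD j 0)) := by
  unfold bc
  rw [List.length_take, Nat.min_eq_left hi]
  apply List.countP_congr
  intro j hj
  simp only [List.mem_range] at hj
  rw [getD_take l i (j+1) (by omega), getD_take l i j (by omega)]

theorem pyGetD_nat (l : List Int) (j : Nat) (h : j < l.length) :
    (PySem.List.pyGet? l (j : Int)).getD 0 = l.getD j 0 := by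
  simp [PySem.List.pyGet?_natCast, List.getD]

-- what dpFind l k = some i tells us when 1 ≤ i: a break at i, no break in (i, k]
theorem dpFind_spec (l : List Int) (k : Nat) (hk : k < l.length) :
    ∀ i, dpFind l k = some i → 1 ≤ i →
      (l.getD i 0 + 1 ≠ l.getD (i-1) 0) ∧
      (∀ j, i < j → j ≤ k → l.getD j 0 + 1 = l.getD (j-1) 0) := by
  induction k with
  | zero =>
      intro i h h1; unfold dpFind at h; split at h
      · simp at h; omega
      · simp at h
  | succ n ih =>
      intro i h h1
      unfold dpFind at h
      split at h
      · rename_i hbr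
        have hi : i = n + 1 := by simp at h; omega
        subst hi
        rw [pyGetD_nat l (n+1) hk, pyGetD_nat l n (by omega)] at hbr
        refine ⟨by simpa using hbr, fun j hj1 hj2 => ?_⟩
        omega
      · rename_i hnbr
        push_neg at hnbr
        rw [pyGetD_nat l (n+1) hk, pyGetD_nat l n (by omega)] at hnbr
        obtain ⟨hb, habove⟩ := ih (by omega) i h h1
        refine ⟨hb, fun j hj1 hj2 => ?_⟩
        rcases Nat.lt_or_ge j (n+1) with hlt | hge
        · exact habove j hj1 (by omega)
        · have hj : j = n + 1 := by omega
          subst hj; simpa using hnbr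

-- dpFind l k = some 0: no break anywhere in 1..k
theorem dpFind_zero_spec (l : List Int) (k : Nat) (hk : k < l.length) :
    dpFind l k = some 0 →
      ∀ j, 1 ≤ j → j ≤ k → l.getD j 0 + 1 = l.getD (j-1) 0 := by
  induction k with
  | zero => intro _ j h1 h2; omega
  | succ n ih =>
      intro h j h1 h2
      unfold dpFind at h
      split at h
      · simp at h
      · rename_i hnbr
        push_neg at hnbr
        rw [pyGetD_nat l (n+1) hk, pyGetD_nat l n (by omega)] at hnbr
        rcases Nat.lt_or_ge j (n+1) with hlt | hge
        · exact ih (by omega) h j h1 (by omega)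
        · have hj : j = n + 1 := by omega
          subst hj; simpa using hnbr

-- chained descent: no break in 1..k forces l[k] = l[0] - k
theorem chain_getD (l : List Int) (k : Nat)
    (h : ∀ j, 1 ≤ j → j ≤ k → l.getD j 0 + 1 = l.getD (j-1) 0) :
    l.getD k 0 = l.getD 0 0 - k := by
  induction k with
  | zero => simp
  | succ n ih =>
      have hn := ih (fun j h1 h2 => h j h1 (by omega))
      have hs := h (n+1) (by omega) (le_refl _)
      simp only [Nat.add_sub_cancel] at hs
      push_cast
      omega

-- A's loop never falls through for a list of length ≥ 2
theorem dpFind_none_spec (l : List Int) : ∀ k, k < l.length → dpFind l k = none →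
    ((PySem.List.pyGet? l 0).getD 0 + 1 = (PySem.List.pyGet? l (-1)).getD 0) ∧
    (∀ j, 1 ≤ j → j ≤ k → l.getD j 0 + 1 = l.getD (j-1) 0) := by
  intro k
  induction k with
  | zero =>
      intro hk h; unfold dpFind at h; split at h
      · simp at h
      · rename_i hc; push_neg at hc; exact ⟨hc, fun j h1 h2 => by omega⟩
  | succ n ih =>
      intro hk h; unfold dpFind at h; split at h
      · simp at h
      · rename_i hc; push_neg at hc
        rw [pyGetD_nat l (n+1) hk, pyGetD_nat l n (by omega)] at hc
        obtain ⟨h0, hrest⟩ := ih (by omega) h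
        refine ⟨h0, fun j h1 h2 => ?_⟩
        rcases Nat.lt_or_ge j (n+1) with hlt | hge
        · exact hrest j h1 (by omega)
        · have hj : j = n + 1 := by omega
          subst hj; simpa using hc

theorem dpFind_ne_none (l : List Int) (h2 : 2 ≤ l.length) :
    dpFind l (l.length - 1) ≠ none := by
  intro hnone
  obtain ⟨h0, hall⟩ := dpFind_none_spec l (l.length - 1) (by omega) hnone
  have hchain := chain_getD l (l.length - 1) hall
  have hlen : l ≠ [] := by intro he; simp [he] at h2
  have hlast : (PySem.List.pyGet? l (-1)).getD 0 = l.getD (l.length - 1) 0 := by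
    rw [PySem.List.pyGet?_neg_one]
    cases l with
    | nil => simp at hlen
    | cons a t => simp [List.getLast?_eq_getElem?, List.getD]
  rw [PySem.List.pyGet?_zero, hlast, hchain] at h0
  rw [List.getD_eq_getElem?_getD] at h0
  omega

-- splitting the break count at the LAST break i (1 ≤ i)
theorem bc_split (l : List Int) (i : Nat) (h1 : 1 ≤ i) (h2 : i ≤ l.length - 1)
    (hlen : 2 ≤ l.length)
    (hbr : l.getD i 0 + 1 ≠ l.getD (i-1) 0)
    (habove : ∀ j, i < j → j ≤ l.length - 1 → l.getD j 0 + 1 = l.getD (j-1) 0) :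
    bc l = ((List.range (i - 1)).countP
             (fun j => decide (l.getD (j+1) 0 + 1 ≠ l.getD j 0))) + 1 := by
  unfold bc
  have hsplit : l.length - 1 = ((i - 1) + 1) + (l.length - 1 - i) := by omega
  rw [hsplit, List.range_add, List.countP_append, List.range_succ, List.countP_append,
      List.countP_map]
  have hz : (List.range (l.length - 1 - i)).countP
      ((fun j => decide (l.getD (j+1) 0 + 1 ≠ l.getD j 0)) ∘ (fun x => (i - 1 + 1) + x)) = 0 := by
    apply List.countP_eq_zero.mpr
    intro t ht
    simp only [List.mem_range] at ht
    simp only [Function.comp, decide_eq_true_eq]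
    have : i - 1 + 1 = i := by omega
    rw [this]
    have := habove (i + t + 1) (by omega) (by omega)
    simp only [Nat.add_sub_cancel] at this
    simp only [ne_eq, not_not]
    convert this using 3 <;> omega
  rw [hz]
  have hone : (List.countP (fun j => decide (l.getD (j+1) 0 + 1 ≠ l.getD j 0)) [i-1]) = 1 := by
    simp only [List.countP_singleton]
    have hi1 : i - 1 + 1 = i := by omega
    rw [hi1]
    simpa [List.getD_eq_getElem?_getD] using hbr
  rw [hone]

theorem bc_zero_of_no_break (l : List Int)
    (h : ∀ j, 1 ≤ j → j ≤ l.length - 1 → l.getD j 0 + 1 = l.getD (j-1) 0) :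
    bc l = 0 := by
  unfold bc
  apply List.countP_eq_zero.mpr
  intro j hj
  simp only [List.mem_range] at hj
  simp only [decide_eq_true_eq, ne_eq, not_not]
  have := h (j+1) (by omega) (by omega)
  simpa using this

-- main equivalence, by the recursion structure of dp
theorem dp_eq_alt (l : List Int) : dp l = dp_alt l := by
  induction l using dp.induct with
  | case1 l h0 =>
      have he : l = [] := List.eq_nil_of_length_eq_zero h0
      subst he
      rw [dp]
      simp [dp_alt]
  | case2 l h0 h1 =>
      have hne : l ≠ [] := by intro he; simp [he] at h1
      rw [dp, if_neg h0, if_pos h1, dp_alt_eq_bc l hne]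
      unfold bc
      rw [h1]
      simp
  | case3 l h0 h1 i hf ih =>
      have hlen : 2 ≤ l.length := by
        rcases Nat.lt_or_ge l.length 2 with h | h
        · interval_cases hL : l.length <;> omega
        · exact h
      have hi := dpFind_le l (l.length - 1) i hf
      have hile : i ≤ l.length := by omega
      have hdp : dp l = 1 + dp (PySem.List.slice l none (some (i : Int))) := by
        rw [dp, if_neg h0, if_neg h1]
        split
        · rename_i i' hf'
          have heq := hf.symm.trans hf'
          injection heq with heq
          rw [heq]
        · rename_i hf'
          rw [hf'] at hf; cases hf
      rw [hdp]
      rw [PySem.List.slice_to_natCast] at ih ⊢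
      rw [ih, dp_alt_eq_bc l (by intro he; simp [he] at hlen)]
      rcases Nat.eq_zero_or_pos i with hz | hpos
      · subst hz
        have hnb := dpFind_zero_spec l (l.length - 1) (by omega) hf
        rw [bc_zero_of_no_break l hnb]
        simp [dp_alt]
      · obtain ⟨hbr, habove⟩ := dpFind_spec l (l.length - 1) (by omega) i hf hpos
        have htne : l.take i ≠ [] := by
          intro he
          have : (l.take i).length = 0 := by rw [he]; rfl
          rw [List.length_take, Nat.min_eq_left hile] at this
          omega
        rw [dp_alt_eq_bc _ htne, bc_take l i hile,
            bc_split l i hpos (by omega) hlen hbr habove]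
        push_cast
        ring
  | case4 l h0 h1 hf =>
      exact absurd hf (dpFind_ne_none l (by omega))

-- ===== VERDICT (by name: the statement is the Claim_ definition above) =====
theorem dp_spec : Claim_equal_dp := by
  intro l _
  unfold Spec_dp
  exact dp_eq_alt l
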